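-- pv_equiv track=rewrite | github.com/GillesArcas/Advent_of_Code | 2023/14.py | tilt_col_east
-- ===== SOURCE A (Python) =====
-- def tilt_col_east(row):
--     s = ''.join(row)
--     while 1:
--         s2 = s.replace('O.', '.O')
--         if s2 == s:
--             return list(s)
--         else:
--             s = s2
-- ===== SOURCE B (Python) =====
-- def tilt_col_east(row):
--     # One pass: within each maximal run of '.'/'O' characters, all dots
--     # come out first and all stones last; any other character blocks.
--     out = []
--     dots = 0
--     balls = 0
--     for c in ''.join(row):
--         if c == '.':
--             dots += 1
--         elif c == 'O':
--             balls += 1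
--         else:
--             out.append('.' * dots + 'O' * balls + c)
--             dots = 0
--             balls = 0
--     out.append('.' * dots + 'O' * balls)
--     return list(''.join(out))
-- ===== Notes on version B (the rewrite author's own statement) =====
-- stated objective: alternative
-- what changed: Replaced the fixpoint iteration of str.replace('O.', '.O') by a single left-to-right pass that counts dots and stones per blocker-delimited run and emits dots then stones once per run; asymptotically O(n) vs A's O(n*k) passes, though A's C-level replace is not measurably slower at the tested sizes.
import Mathlib
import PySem

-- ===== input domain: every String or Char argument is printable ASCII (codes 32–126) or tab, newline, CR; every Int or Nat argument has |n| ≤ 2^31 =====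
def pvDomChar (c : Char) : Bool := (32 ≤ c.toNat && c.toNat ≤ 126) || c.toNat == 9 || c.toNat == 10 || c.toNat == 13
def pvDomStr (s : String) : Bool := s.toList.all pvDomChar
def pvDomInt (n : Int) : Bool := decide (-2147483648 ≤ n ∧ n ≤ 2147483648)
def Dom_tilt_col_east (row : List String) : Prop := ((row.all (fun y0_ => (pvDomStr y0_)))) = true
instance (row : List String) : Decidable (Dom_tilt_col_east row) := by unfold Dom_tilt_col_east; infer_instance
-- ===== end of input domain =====

-- B changes the algorithm: one counting pass per blocker-delimited run instead of
-- iterating str.replace('O.', '.O') to a fixpoint.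

-- ===== PORT A =====
-- Helpers needed by the port's termination argument (the while-loop terminates
-- because each changing replace step strictly decreases the measure `muOD`).

-- one simultaneous left-to-right pass of  s.replace('O.', '.O')
def stepOD : List Char → List Char
  | 'O' :: '.' :: t => '.' :: 'O' :: stepOD t
  | c :: t => c :: stepOD t
  | [] => []

-- measure: each 'O' contributes its distance to the right end
def muOD : List Char → Nat
  | [] => 0
  | c :: t => (if c = 'O' then t.length + 1 else 0) + muOD t

theorem replaceOD_go_eq_step (fuel : Nat) (l acc : List Char) (h : l.length ≤ fuel) :
    PySem.Chars.replace.go ['O', '.'] ['.', 'O'] fuel l acc = acc.reverse ++ stepOD l := by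
  induction fuel generalizing l acc with
  | zero =>
    have : l = [] := by cases l <;> simp_all
    subst this
    simp [PySem.Chars.replace.go, stepOD]
  | succ n ih =>
    match l with
    | [] => simp [PySem.Chars.replace.go, stepOD]
    | c :: t =>
      rw [PySem.Chars.replace.go]
      by_cases hp : List.isPrefixOf ['O', '.'] (c :: t) = true
      · rw [if_pos hp]
        cases t with
        | nil => simp [List.isPrefixOf] at hp
        | cons d t' =>
          simp [List.isPrefixOf] at hp
          obtain ⟨rfl, rfl⟩ := hp
          rw [show List.drop (['O', '.'] : List Char).length ('O' :: '.' :: t') = t' from rfl]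
          rw [ih t' _ (by simp at h ⊢; omega)]
          simp [stepOD]
      · rw [if_neg hp]
        rw [ih t _ (by simp at h ⊢; omega)]
        have hstep : stepOD (c :: t) = c :: stepOD t := by
          rw [stepOD]
          intro t' h1 h2
          rw [h1, h2] at hp
          simp [List.isPrefixOf] at hp
        simp [hstep]

theorem replaceOD_eq_step (l : List Char) :
    PySem.Chars.replace l ['O', '.'] ['.', 'O'] = stepOD l := by
  rw [PySem.Chars.replace]
  simp [replaceOD_go_eq_step l.length l [] le_rfl]

theorem length_stepOD (l : List Char) : (stepOD l).length = l.length := by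
  induction l using stepOD.induct with
  | case1 t ih => simp [stepOD, ih]
  | case2 c t _ ih => rw [stepOD] <;> simp_all
  | case3 => rfl

theorem muOD_stepOD_le (l : List Char) : muOD (stepOD l) ≤ muOD l := by
  induction l using stepOD.induct with
  | case1 t ih => simp [stepOD, muOD, length_stepOD]; omega
  | case2 c t h ih =>
    rw [stepOD]
    · simp only [muOD, length_stepOD]; omega
    · exact h
  | case3 => simp [stepOD]

theorem muOD_stepOD_lt (l : List Char) (h : stepOD l ≠ l) : muOD (stepOD l) < muOD l := by
  induction l using stepOD.induct with
  | case1 t ih =>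
    have := muOD_stepOD_le t
    simp [stepOD, muOD, length_stepOD]; omega
  | case2 c t hm ih =>
    rw [stepOD] at h ⊢
    · have ht : stepOD t ≠ t := by intro he; exact h (by rw [he])
      simp only [muOD, length_stepOD]
      have := ih ht
      omega
    · exact hm
    · exact hm
  | case3 => simp [stepOD] at h

-- the while-loop of A, on the character list of s
def tiltLoopA (s : List Char) : List Char :=
  let s2 := PySem.Chars.replace s ['O', '.'] ['.', 'O']
  if s2 = s then s else tiltLoopA s2
termination_by muOD s
decreasing_by
  rename_i h
  simp only [s2, replaceOD_eq_step] at h ⊢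
  exact muOD_stepOD_lt s h

def tilt_col_east (row : List String) : List String :=
  let s := PySem.Str.join "" row
  (tiltLoopA s.toList).map (fun c => String.mk [c])

-- ===== PORT B =====
-- the for-loop of Source B: `dots`/`balls` count the pending run, blockers flush it
def altGo : List Char → Nat → Nat → List Char
  | [], dots, balls => List.replicate dots '.' ++ List.replicate balls 'O'
  | c :: t, dots, balls =>
    if c = '.' then altGo t (dots + 1) balls
    else if c = 'O' then altGo t dots (balls + 1)
    else List.replicate dots '.' ++ List.replicate balls 'O' ++ c :: altGo t 0 0

def tilt_col_east_alt (row : List String) : List String :=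
  (altGo (PySem.Str.join "" row).toList 0 0).map (fun c => String.mk [c])

-- ===== PRECONDITION & SPEC =====
def Spec_tilt_col_east (row : List String) (out : List String) : Prop := out = tilt_col_east_alt row
instance (row : List String) (out : List String) : Decidable (Spec_tilt_col_east row out) := by unfold Spec_tilt_col_east; infer_instance

-- ===== CLAIM (what is proved, stated in full; the proofs are below) =====
def Claim_equal_tilt_col_east : Prop := ∀ (row : List String), Dom_tilt_col_east row → Spec_tilt_col_east row (tilt_col_east row)

-- ===== LEMMAS AND PROOFS =====

theorem altGo_stepOD (l : List Char) : ∀ d b, altGo (stepOD l) d b = altGo l d b := by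
  induction l using stepOD.induct with
  | case1 t ih => intro d b; simp [stepOD, altGo, ih]
  | case2 c t hm ih =>
    intro d b
    rw [stepOD]
    · simp only [altGo]
      split_ifs <;> simp [ih]
    · exact hm
  | case3 => intro d b; rfl

theorem altGo_fixed (l : List Char) : ∀ d b, stepOD l = l → (b = 0 ∨ l.head? ≠ some '.') →
    altGo l d b = List.replicate d '.' ++ List.replicate b 'O' ++ l := by
  induction l with
  | nil => intro d b _ _; simp [altGo]
  | cons c t ih =>
    intro d b hs hb
    by_cases hdot : c = '.'
    · subst hdot
      have hb0 : b = 0 := by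
        rcases hb with hb | hb
        · exact hb
        · simp at hb
      subst hb0
      have hst : stepOD t = t := by
        rw [stepOD] at hs
        · exact (List.cons.injEq _ _ _ _ ▸ hs).2
        · intro t' h1; simp at h1
      simp only [altGo]
      rw [ih (d + 1) 0 hst (Or.inl rfl)]
      simp [List.replicate_succ']
    · by_cases hO : c = 'O'
      · subst hO
        have htd : t.head? ≠ some '.' := by
          intro hhd
          cases t with
          | nil => simp at hhd
          | cons d' t' =>
            simp at hhd
            subst hhd
            rw [stepOD] at hs
            simp at hs
        have hst : stepOD t = t := by
          cases t with
          | nil => rfl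
          | cons d' t' =>
            have hd' : d' ≠ '.' := by intro h; exact htd (by simp [h])
            rw [stepOD] at hs
            · exact (List.cons.injEq _ _ _ _ ▸ hs).2
            · intro t'' _ h2
              simp at h2
              exact hd' h2.1
        simp only [altGo, if_neg (by decide : ¬ ('O' = '.'))]
        rw [ih d (b + 1) hst (Or.inr htd)]
        simp [List.replicate_succ']
      · have hst : stepOD t = t := by
          rw [stepOD] at hs
          · exact (List.cons.injEq _ _ _ _ ▸ hs).2
          · intro t' h1 h2; exact hO h1
        simp only [altGo, if_neg hdot, if_neg hO]
        rw [ih 0 0 hst (Or.inl rfl)]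
        simp

theorem tiltLoopA_eq_altGo (s : List Char) : tiltLoopA s = altGo s 0 0 := by
  generalize hn : muOD s = n
  induction n using Nat.strong_induction_on generalizing s with
  | _ n ih =>
    rw [tiltLoopA]
    simp only [replaceOD_eq_step]
    by_cases h : stepOD s = s
    · rw [if_pos h, altGo_fixed s 0 0 h (Or.inl rfl)]
      simp
    · rw [if_neg h]
      subst hn
      rw [ih (muOD (stepOD s)) (muOD_stepOD_lt s h) (stepOD s) rfl, altGo_stepOD]

-- ===== VERDICT (by name: the statement is the Claim_ definition above) =====
theorem tilt_col_east_spec : Claim_equal_tilt_col_east := by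
  intro row _
  simp only [Spec_tilt_col_east, tilt_col_east, tilt_col_east_alt, tiltLoopA_eq_altGo]
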